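-- pv_equiv track=rewrite | github.com/ArefAghajani/opposite_color | complementary_color.py | CColor
-- ===== SOURCE A (Python) =====
-- def CColor(n):
--     input_color = []
--     m = n[1:]
--     input_color.append([m[0:2],m[2:4],m[4:6]])
--     for i in range(len(input_color)):
--         for j in range(3):
--             input_color[i][j] = int(input_color[i][j],16)
--             input_color[i][j] = 255 - input_color[i][j]
--             input_color[i][j] = f'{input_color[i][j]:02X}'
--     output = []
--     for i in range(len(input_color)):
--         m = '#'
--         for j in range(3):
--             m+=input_color[i][j]
--         output.append(m)
--     for i in output:
--         return i
-- ===== SOURCE B (Python) =====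
-- def CColor(n):
--     m = n[1:]
--     r = int(m[0:2], 16)
--     g = int(m[2:4], 16)
--     b = int(m[4:6], 16)
--     inv = (255 - r) * 65536 + (255 - g) * 256 + (255 - b)
--     return f'#{inv:06X}'
-- ===== Notes on version B (the rewrite author's own statement) =====
-- stated objective: simpler
-- what changed: B drops A's list-of-lists and its two index loops (per-component parse/invert/format plus a string-concatenation loop) and instead folds the three inverted bytes into one 24-bit integer formatted once as f'#{inv:06X}'.
-- outside the precondition, e.g. on CColor('#-1-1-1'): A returns '#100100100', B returns '#1010100'
import Mathlib
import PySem

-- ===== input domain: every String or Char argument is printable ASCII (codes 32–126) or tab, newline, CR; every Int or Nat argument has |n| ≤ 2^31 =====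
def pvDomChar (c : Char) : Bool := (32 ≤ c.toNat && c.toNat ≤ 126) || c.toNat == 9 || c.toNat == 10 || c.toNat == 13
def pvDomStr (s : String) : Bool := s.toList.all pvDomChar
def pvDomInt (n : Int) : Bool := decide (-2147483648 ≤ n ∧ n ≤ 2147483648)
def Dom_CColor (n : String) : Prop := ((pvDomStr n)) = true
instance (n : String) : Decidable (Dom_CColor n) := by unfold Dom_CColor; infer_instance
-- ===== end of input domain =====

-- B replaces A's list-of-lists, per-component format loop and string-concatenation loop by one
-- 24-bit integer (255-r)*65536+(255-g)*256+(255-b) formatted once as '#%06X' (objective: simpler).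


-- ===== PORT A =====
-- uppercase hex digit of d, 0 ≤ d < 16
def hxDig (d : Int) : Char := ("0123456789ABCDEF".toList).getD d.toNat '0'

-- f'{v:02X}' — exact for 0 ≤ v ≤ 255 (the only values reached under Pre_CColor)
def hex2 (v : Int) : List Char := [hxDig (v / 16 % 16), hxDig (v % 16)]

def CColor (n : String) : String :=
  -- m = n[1:]
  let m := PySem.List.slice n.toList (some 1) none
  -- input_color.append([m[0:2], m[2:4], m[4:6]])  (a single row, looped over by range(len(input_color)))
  let row := [PySem.List.slice m (some 0) (some 2),
              PySem.List.slice m (some 2) (some 4),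
              PySem.List.slice m (some 4) (some 6)]
  -- inner j-loop: int(·,16), 255 - ·, f'{·:02X}'  (int(s,16) = PySem.Int.ofCharsBase?; none = ValueError, excluded by Pre_)
  let row2 := row.map (fun s =>
    match PySem.Int.ofCharsBase? s 16 with
    | some v => hex2 (255 - v)
    | none => [])
  -- output loop: m = '#'; for j in range(3): m += row2[j]; return output[0]
  String.ofList (row2.foldl (fun acc c => acc ++ c) ['#'])

-- ===== PORT B =====
-- f'{v:06X}' — exact for 0 ≤ v ≤ 0xFFFFFF (the only values reached under Pre_CColor)
def hex6 (v : Int) : List Char :=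
  [hxDig (v / 1048576 % 16), hxDig (v / 65536 % 16), hxDig (v / 4096 % 16),
   hxDig (v / 256 % 16), hxDig (v / 16 % 16), hxDig (v % 16)]

def CColor_alt (n : String) : String :=
  let m := PySem.List.slice n.toList (some 1) none
  match PySem.Int.ofCharsBase? (PySem.List.slice m (some 0) (some 2)) 16,
        PySem.Int.ofCharsBase? (PySem.List.slice m (some 2) (some 4)) 16,
        PySem.Int.ofCharsBase? (PySem.List.slice m (some 4) (some 6)) 16 with
  | some r, some g, some b =>
      String.ofList ('#' :: hex6 ((255 - r) * 65536 + (255 - g) * 256 + (255 - b)))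
  | _, _, _ => ""   -- ValueError in Python; excluded by Pre_

-- ===== PRECONDITION & SPEC =====
-- the characters int(·,16) reads as plain hex digits
def hexChars : List Char :=
  ['0','1','2','3','4','5','6','7','8','9','a','b','c','d','e','f','A','B','C','D','E','F']

-- the ASCII whitespace int(·) strips (the printable/tab/newline/CR domain has no \x0b/\f)
def spChars : List Char := [' ', '\t', '\n', '\r']

-- a 1- or 2-character colour component that int(·,16) parses to a NONNEGATIVE value:
-- hex digits, optionally space-padded or with a leading '+'
def compOk (cs : List Char) : Bool :=
  match cs with
  | [a] => a ∈ hexChars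
  | [a, b] => (a ∈ hexChars && b ∈ hexChars) || ((a ∈ spChars || a == '+') && b ∈ hexChars)
              || (a ∈ hexChars && b ∈ spChars)
  | _ => false

-- Pre_ = the three component slices of n[1:] exist and each parses to a nonnegative byte.  It
-- excludes minus-signed components, which int(·,16) also accepts: there the inverted component
-- leaves the byte range and A's 3-hex-digit concatenation is an implementation artefact.
def Pre_CColor (n : String) : Prop :=
  6 ≤ n.toList.length ∧
  compOk ((n.toList.drop 1).take 2) = true ∧
  compOk ((n.toList.drop 3).take 2) = true ∧
  compOk ((n.toList.drop 5).take 2) = true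
instance (n : String) : Decidable (Pre_CColor n) := by unfold Pre_CColor; infer_instance

def pvWitness_CColor : String := "#00fF7f"

def Spec_CColor (n : String) (out : String) : Prop := out = CColor_alt n
instance (n : String) (out : String) : Decidable (Spec_CColor n out) := by unfold Spec_CColor; infer_instance

-- ===== CLAIM (what is proved, stated in full; the proofs are below) =====
def Claim_equal_CColor : Prop := ∀ (n : String), Dom_CColor n → Pre_CColor n → Spec_CColor n (CColor n)

-- ===== LEMMAS AND PROOFS =====
-- value of a parsed component
def cval (cs : List Char) : Int := (PySem.Int.ofCharsBase? cs 16).getD 0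

-- Q cs: the component parses, to a value in [0, 256)
def Q (cs : List Char) : Prop :=
  (PySem.Int.ofCharsBase? cs 16).isSome = true ∧ 0 ≤ cval cs ∧ cval cs < 256

theorem Q1 : ∀ a ∈ hexChars, Q [a] := by
  intro a ha; fin_cases ha <;> (unfold Q cval; decide)

theorem Q2 : ∀ a ∈ hexChars, ∀ b ∈ hexChars, Q [a, b] := by
  intro a ha b hb; fin_cases ha <;> fin_cases hb <;> (unfold Q cval; decide)

theorem Q3 : ∀ a ∈ (spChars ++ ['+']), ∀ b ∈ hexChars, Q [a, b] := by
  intro a ha b hb; fin_cases ha <;> fin_cases hb <;> (unfold Q cval; decide)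

theorem Q4 : ∀ a ∈ hexChars, ∀ b ∈ spChars, Q [a, b] := by
  intro a ha b hb; fin_cases ha <;> fin_cases hb <;> (unfold Q cval; decide)

theorem comp_val (cs : List Char) (h : compOk cs = true) :
    ∃ v, PySem.Int.ofCharsBase? cs 16 = some v ∧ 0 ≤ v ∧ v < 256 := by
  have hq : Q cs := by
    match cs, h with
    | [a], h =>
      exact Q1 a (by simpa [compOk] using h)
    | [a, b], h =>
      simp only [compOk, Bool.or_eq_true, Bool.and_eq_true, decide_eq_true_eq, beq_iff_eq] at h
      rcases h with (⟨ha, hb⟩ | ⟨ha, hb⟩) | ⟨ha, hb⟩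
      · exact Q2 a ha b hb
      · refine Q3 a ?_ b hb
        rcases ha with ha | ha
        · exact List.mem_append_left _ ha
        · subst ha; exact List.mem_append_right _ (by decide)
      · exact Q4 a ha b hb
  obtain ⟨h1, h2, h3⟩ := hq
  obtain ⟨v, hv⟩ := Option.isSome_iff_exists.mp h1
  have hcv : cval cs = v := by simp [cval, hv]
  exact ⟨v, hv, hcv ▸ h2, hcv ▸ h3⟩

theorem hex6_split (x y z : Int) (_hx0 : 0 ≤ x) (_hx1 : x < 256) (hy0 : 0 ≤ y) (hy1 : y < 256)
    (hz0 : 0 ≤ z) (hz1 : z < 256) :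
    hex6 (x * 65536 + y * 256 + z) = hex2 x ++ hex2 y ++ hex2 z := by
  simp only [hex6, hex2, List.cons_append, List.nil_append, List.cons.injEq, and_true]
  refine ⟨congrArg hxDig (by omega), congrArg hxDig (by omega), congrArg hxDig (by omega),
          congrArg hxDig (by omega), congrArg hxDig (by omega), congrArg hxDig (by omega)⟩

-- both ports as a function of the character list, with the common slices
theorem core_eq (l : List Char) (hlen : 6 ≤ l.length)
    (h1 : compOk ((l.drop 1).take 2) = true) (h2 : compOk ((l.drop 3).take 2) = true)
    (h3 : compOk ((l.drop 5).take 2) = true) :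
    String.ofList (([PySem.List.slice (PySem.List.slice l (some 1) none) (some 0) (some 2),
                 PySem.List.slice (PySem.List.slice l (some 1) none) (some 2) (some 4),
                 PySem.List.slice (PySem.List.slice l (some 1) none) (some 4) (some 6)].map (fun s =>
        match PySem.Int.ofCharsBase? s 16 with
        | some v => hex2 (255 - v)
        | none => [])).foldl (fun acc c => acc ++ c) ['#']) =
    (match PySem.Int.ofCharsBase? (PySem.List.slice (PySem.List.slice l (some 1) none) (some 0) (some 2)) 16,
           PySem.Int.ofCharsBase? (PySem.List.slice (PySem.List.slice l (some 1) none) (some 2) (some 4)) 16,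
           PySem.Int.ofCharsBase? (PySem.List.slice (PySem.List.slice l (some 1) none) (some 4) (some 6)) 16 with
     | some r, some g, some b =>
         String.ofList ('#' :: hex6 ((255 - r) * 65536 + (255 - g) * 256 + (255 - b)))
     | _, _, _ => "") := by
  match l, hlen with
  | c0 :: a :: b :: c :: d :: e :: rest, _ =>
    have hm : PySem.List.slice (c0 :: a :: b :: c :: d :: e :: rest) (some 1) none
        = a :: b :: c :: d :: e :: rest := by
      simpa using PySem.List.slice_from_natCast (c0 :: a :: b :: c :: d :: e :: rest) 1
    rw [hm]
    have s1 : PySem.List.slice (a :: b :: c :: d :: e :: rest) (some 0) (some 2) = [a, b] := by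
      simpa using PySem.List.slice_natCast (a :: b :: c :: d :: e :: rest) 0 2
    have s2 : PySem.List.slice (a :: b :: c :: d :: e :: rest) (some 2) (some 4) = [c, d] := by
      simpa using PySem.List.slice_natCast (a :: b :: c :: d :: e :: rest) 2 4
    have s3 : PySem.List.slice (a :: b :: c :: d :: e :: rest) (some 4) (some 6)
        = e :: rest.take 1 := by
      simpa using PySem.List.slice_natCast (a :: b :: c :: d :: e :: rest) 4 6
    rw [s1, s2, s3]
    simp only [List.drop_succ_cons, List.drop_zero, List.take_succ_cons] at h1 h2 h3
    obtain ⟨vr, hvr, hvr0, hvr1⟩ := comp_val [a, b] h1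
    obtain ⟨vg, hvg, hvg0, hvg1⟩ := comp_val [c, d] h2
    obtain ⟨vb, hvb, hvb0, hvb1⟩ := comp_val (e :: rest.take 1) h3
    simp only [List.map, List.foldl]
    rw [hvr, hvg, hvb]
    dsimp only
    rw [hex6_split (255 - vr) (255 - vg) (255 - vb)
        (by omega) (by omega) (by omega) (by omega) (by omega) (by omega)]
    simp

-- ===== VERDICT (by name: the statement is the Claim_ definition above) =====
theorem CColor_spec : Claim_equal_CColor := by
  intro n _ pre
  obtain ⟨hlen, h1, h2, h3⟩ := pre
  show CColor n = CColor_alt n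
  unfold CColor CColor_alt
  exact core_eq n.toList hlen h1 h2 h3
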